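-- pv_equiv track=rewrite | github.com/andrewmacheret/aoc | 2015/python/day15/main.py | pick_sum
-- ===== SOURCE A (Python) =====
-- def pick_sum(count, size):
--   if count == 1:
--     for x in range(size):
--       yield (x,)
--   else:
--     for x in range(size):
--       for tup in pick_sum(count-1, size-x):
--         yield x, *tup
-- ===== SOURCE B (Python) =====
-- def pick_sum(count, size):
--   # Iterative depth-first traversal with an explicit stack instead of A's recursive
--   # generator: each stack entry is (prefix, remaining budget); children are pushed in
--   # reversed order so popping from the end reproduces A's lexicographic order.
--   stack = [((), size)]
--   while stack:
--     prefix, budget = stack.pop()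
--     if len(prefix) >= count:
--       yield prefix
--     else:
--       for x in reversed(range(budget)):
--         stack.append((prefix + (x,), budget - x))
-- ===== Notes on version B (the rewrite author's own statement) =====
-- stated objective: alternative
-- what changed: Replaces A's recursive generator with an iterative depth-first traversal driven by an explicit stack of (prefix, remaining-budget) pairs, pushing children in reversed order to keep A's lexicographic output order.
-- outside the precondition, e.g. on pick_sum(0, 0): A returns [], B returns [()]; on pick_sum(-2, -1): A returns [], B returns [()]
import Mathlib
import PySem

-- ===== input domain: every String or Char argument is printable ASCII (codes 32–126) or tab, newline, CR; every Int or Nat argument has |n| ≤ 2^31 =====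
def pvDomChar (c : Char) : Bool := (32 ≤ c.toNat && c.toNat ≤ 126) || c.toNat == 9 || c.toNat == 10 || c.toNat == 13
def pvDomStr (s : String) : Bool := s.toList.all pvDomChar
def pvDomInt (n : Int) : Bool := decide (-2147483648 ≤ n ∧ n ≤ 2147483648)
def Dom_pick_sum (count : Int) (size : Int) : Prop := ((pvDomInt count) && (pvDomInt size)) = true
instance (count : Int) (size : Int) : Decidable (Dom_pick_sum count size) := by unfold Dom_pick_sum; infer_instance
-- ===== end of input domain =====

-- B replaces A's recursive generator by an iterative depth-first traversal with an
-- explicit stack, proved equal to A on Pre_. Both Pythons are generators; equality is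
-- about the yielded sequence, materialised as a list.

-- ===== PORT A =====
-- Recursion on count.toNat (Pre_ gives count ≥ 1, so the 0 case is never reached).
def pickA : Nat → Int → List (List Int)
  | 0, _ => []
  | 1, size => (PySem.List.pyRange 0 size 1).map (fun x => [x])
  | (n+2), size =>
      (PySem.List.pyRange 0 size 1).flatMap (fun x => (pickA (n+1) (size - x)).map (fun t => x :: t))

def pick_sum (count : Int) (size : Int) : List (List Int) := pickA count.toNat size

-- ===== PORT B =====
-- termination measure of one stack entry (prefix, budget): an upper bound on the
-- number of descendants of that entry in B's depth-first traversal
def pvPhi (count : Int) (e : List Int × Int) : Nat :=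
  (e.2.toNat + 1) ^ (count - e.1.length).toNat

-- the measure of the whole stack strictly drops when an entry is expanded
lemma pvPhi_expand_lt (count : Int) (p : List Int) (b : Int)
    (h : ¬ count ≤ (p.length : Int)) :
    (((PySem.List.pyRange 0 b 1).map (fun x => (p ++ [x], b - x))).map (pvPhi count)).sum
      < pvPhi count (p, b) := by
  have hk : (count - (p.length : Int)).toNat = (count - (p.length : Int) - 1).toNat + 1 := by
    omega
  have hbound : ∀ n ∈ (((PySem.List.pyRange 0 b 1).map (fun x => (p ++ [x], b - x))).map (pvPhi count)),
      n ≤ (b.toNat + 1) ^ (count - (p.length : Int) - 1).toNat := by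
    intro n hn
    simp only [List.map_map, List.mem_map, Function.comp] at hn
    obtain ⟨x, hx, rfl⟩ := hn
    have hxb := (PySem.List.mem_pyRange_one).mp hx
    unfold pvPhi
    simp only [List.length_append, List.length_cons, List.length_nil]
    have h1 : ((b - x).toNat + 1) ≤ b.toNat + 1 := by omega
    have h2 : (count - ((p.length : Nat) + 1 : Nat) : Int).toNat = (count - (p.length : Int) - 1).toNat := by
      push_cast
      omega
    rw [h2]
    exact Nat.pow_le_pow_left h1 _
  have hlen : (((PySem.List.pyRange 0 b 1).map (fun x => (p ++ [x], b - x))).map (pvPhi count)).length = b.toNat := by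
    simp [PySem.List.length_pyRange_one]
  have hsum := List.sum_le_card_nsmul _ _ hbound
  rw [hlen, smul_eq_mul] at hsum
  unfold pvPhi
  simp only []
  rw [hk]
  calc (((PySem.List.pyRange 0 b 1).map (fun x => (p ++ [x], b - x))).map (pvPhi count)).sum
      ≤ b.toNat * (b.toNat + 1) ^ (count - (p.length : Int) - 1).toNat := hsum
    _ < (b.toNat + 1) * (b.toNat + 1) ^ (count - (p.length : Int) - 1).toNat := by
        exact mul_lt_mul_of_pos_right (by omega) (Nat.pow_pos (by omega))
    _ = (b.toNat + 1) ^ ((count - (p.length : Int) - 1).toNat + 1) := by ring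

-- the while-loop: the list head is the stack top (Python pops from the right end and
-- pushes children over reversed(range(budget)), so the next popped entries are the
-- children in increasing x order — cons-ing them head-first is the same traversal)
def runStack (count : Int) : List (List Int × Int) → List (List Int)
  | [] => []
  | (p, b) :: rest =>
      if count ≤ (p.length : Int) then
        p :: runStack count rest
      else
        runStack count (((PySem.List.pyRange 0 b 1).map (fun x => (p ++ [x], b - x))) ++ rest)
termination_by stack => (stack.map (pvPhi count)).sum
decreasing_by
  · simp only [List.map_cons, List.sum_cons]
    have : 0 < pvPhi count (p, b) := by unfold pvPhi; exact Nat.pow_pos (by omega)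
    omega
  · simp only [List.map_cons, List.sum_cons, List.map_append, List.sum_append]
    have := pvPhi_expand_lt count p b (by assumption)
    omega

def pick_sum_alt (count : Int) (size : Int) : List (List Int) :=
  runStack count [([], size)]

-- ===== PRECONDITION & SPEC =====
-- Pre_ excludes exactly count ≤ 0: for size ≥ 1, A recurses without bound there and
-- raises RecursionError; for size ≤ 0, A's else-loop body happens to run zero times and
-- it yields nothing, while B yields the degenerate empty tuple — an unspecified corner.
def Pre_pick_sum (count : Int) (size : Int) : Prop := 1 ≤ count
instance (count : Int) (size : Int) : Decidable (Pre_pick_sum count size) := by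
  unfold Pre_pick_sum; infer_instance

def pvWitness_pick_sum : Int × Int := (2, 3)

def Spec_pick_sum (count : Int) (size : Int) (out : List (List Int)) : Prop := out = pick_sum_alt count size
instance (count : Int) (size : Int) (out : List (List Int)) : Decidable (Spec_pick_sum count size out) := by unfold Spec_pick_sum; infer_instance

-- ===== CLAIM (what is proved, stated in full; the proofs are below) =====
def Claim_equal_pick_sum : Prop := ∀ (count : Int) (size : Int), Dom_pick_sum count size → Pre_pick_sum count size → Spec_pick_sum count size (pick_sum count size)

-- ===== LEMMAS AND PROOFS =====

lemma flatMap_single {α β : Type} (f : α → β) (l : List α) :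
    (l.flatMap fun x => [f x]) = l.map f := by
  induction l with
  | nil => rfl
  | cons a t ih => simp [ih]

-- A's recursion extended with the trivial 0 case (what one prefix of B's stack expands to)
def pickX : Nat → Int → List (List Int)
  | 0, _ => [[]]
  | (k+1), b => (PySem.List.pyRange 0 b 1).flatMap (fun x => (pickX k (b - x)).map (fun t => x :: t))

lemma pickX_eq_pickA (n : Nat) : ∀ s : Int, pickX (n+1) s = pickA (n+1) s := by
  induction n with
  | zero =>
    intro s
    show (PySem.List.pyRange 0 s 1).flatMap (fun x => ([[]] : List (List Int)).map (fun t => x :: t)) = _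
    show (PySem.List.pyRange 0 s 1).flatMap (fun x => [[x]]) = (PySem.List.pyRange 0 s 1).map (fun x => [x])
    exact flatMap_single (fun x => [x]) _
  | succ m ih =>
    intro s
    show (PySem.List.pyRange 0 s 1).flatMap (fun x => (pickX (m+1) (s - x)).map (fun t => x :: t))
        = (PySem.List.pyRange 0 s 1).flatMap (fun x => (pickA (m+1) (s - x)).map (fun t => x :: t))
    refine List.flatMap_congr (fun x _ => ?_)
    rw [ih]

-- what one stack entry contributes to the output
def contrib (count : Int) (e : List Int × Int) : List (List Int) :=
  (pickX (count - e.1.length).toNat e.2).map (fun t => e.1 ++ t)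

-- loop invariant: the output of B's loop is the concatenation of the contributions of
-- the entries still on the stack
lemma runStack_eq_contrib (count : Int) (stack : List (List Int × Int)) :
    runStack count stack = (stack.map (contrib count)).flatten := by
  induction stack using runStack.induct count with
  | case1 => rw [runStack]; rfl
  | case2 p b rest h ih =>
    rw [runStack]
    simp only [if_pos h]
    rw [ih]
    have hk : (count - (p.length : Int)).toNat = 0 := by omega
    simp [contrib, hk, pickX]
  | case3 p b rest h ih =>
    rw [runStack]
    simp only [if_neg h]
    rw [ih]
    simp only [List.map_append, List.flatten_append, List.map_cons, List.flatten_cons]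
    congr 1
    symm
    rw [← List.flatMap_def, List.flatMap_map]
    have hk : (count - (p.length : Int)).toNat = (count - (p.length : Int) - 1).toNat + 1 := by
      omega
    show contrib count (p, b) = _
    unfold contrib
    rw [hk]
    show ((PySem.List.pyRange 0 b 1).flatMap
        (fun x => (pickX (count - (p.length : Int) - 1).toNat (b - x)).map (fun t => x :: t))).map
          (fun t => p ++ t) = _
    rw [List.map_flatMap]
    refine List.flatMap_congr (fun x _ => ?_)
    have h2 : (count - ((p ++ [x]).length : Int)).toNat = (count - (p.length : Int) - 1).toNat := by
      simp only [List.length_append, List.length_cons, List.length_nil]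
      push_cast
      omega
    simp only [Function.comp, contrib, h2, List.map_map]
    refine List.map_congr_left (fun t _ => ?_)
    simp

-- ===== VERDICT (by name: the statement is the Claim_ definition above) =====
theorem pick_sum_spec : Claim_equal_pick_sum := by
  intro count size _ hpre
  show pick_sum count size = pick_sum_alt count size
  unfold pick_sum pick_sum_alt
  rw [runStack_eq_contrib]
  simp only [List.map_cons, List.map_nil, List.flatten_cons, List.flatten_nil, List.append_nil]
  have hc : (1 : Int) ≤ count := hpre
  unfold contrib
  simp only [List.length_nil, Nat.cast_zero, Int.sub_zero, List.nil_append, List.map_id']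
  obtain ⟨m, hm⟩ : ∃ m : Nat, count.toNat = m + 1 := ⟨count.toNat - 1, by omega⟩
  rw [hm, pickX_eq_pickA]
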